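-- pv_equiv track=rewrite | github.com/NanXiangPU/leetcode | longest-harmonious-subsequence/Solution.py | findLHS
-- ===== SOURCE A (Python) =====
-- def findLHS(nums):
--     """
--     :type nums: List[int]
--     :rtype: int
--     """
--     if nums == None or len(nums) == 0:
--         return 0
--     map = {}
--     res = 0
--     for i in nums:
--         if i in map:
--             map[i] += 1
--         else:
--             map[i] = 1
--     for k in map.keys():
--         if k + 1 in map:
--             res = max(res, map[k] + map[k + 1])
--     return res;
-- ===== SOURCE B (Python) =====
-- def findLHS(nums):
--     s = sorted(nums)
--     runs = []  # (value, multiplicity) of each maximal run of equal values, in increasing order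
--     for x in s:
--         if runs and runs[-1][0] == x:
--             runs[-1] = (runs[-1][0], runs[-1][1] + 1)
--         else:
--             runs.append((x, 1))
--     res = 0
--     for (v1, c1), (v2, c2) in zip(runs, runs[1:]):
--         if v2 == v1 + 1:
--             res = max(res, c1 + c2)
--     return res
-- ===== Notes on version B (the rewrite author's own statement) =====
-- stated objective: alternative
-- what changed: Replaces the frequency-dict build plus key-scan with sort, run-length compression, and a single scan over adjacent runs whose values differ by 1.
import Mathlib
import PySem

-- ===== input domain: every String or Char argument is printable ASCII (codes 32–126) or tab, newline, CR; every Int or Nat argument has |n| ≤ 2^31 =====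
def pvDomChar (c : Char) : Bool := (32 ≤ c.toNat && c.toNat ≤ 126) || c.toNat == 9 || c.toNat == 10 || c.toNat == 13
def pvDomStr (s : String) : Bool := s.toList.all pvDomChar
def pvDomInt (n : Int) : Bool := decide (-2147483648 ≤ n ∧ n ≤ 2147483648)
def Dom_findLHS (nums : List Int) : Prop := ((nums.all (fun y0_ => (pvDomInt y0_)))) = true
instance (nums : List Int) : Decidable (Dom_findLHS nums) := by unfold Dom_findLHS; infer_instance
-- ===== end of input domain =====

-- B replaces the frequency-dict build plus key-scan with sort + run-length compression + one scan
-- over adjacent runs (alternative algorithm, similar cost).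

-- ===== PORT A =====
-- 'nums == None' is always False for a List Int argument, so only the len(nums) == 0 guard remains.
-- map[k] / map[k+1] are looked up only when the key is present (k is a key; k+1 guarded by 'in'),
-- so Dict.getD _ _ 0 is exact there.
def findLHS (nums : List Int) : Int :=
  if nums = [] then 0
  else
    let map := nums.foldl
      (fun d i => if d.contains i then d.insert i (d.getD i 0 + 1) else d.insert i 1)
      PySem.Dict.empty
    map.keys.foldl
      (fun res k => if map.contains (k + 1) then max res (map.getD k 0 + map.getD (k + 1) 0) else res)
      0

-- ===== PORT B =====
-- one step of Source B's run-length loop; 'runs[-1] = (v, c + 1)' replaces the last element,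
-- ported as dropLast ++ [new last]; 'if runs and …' is the none/some match on getLast?
def runStep (runs : List (Int × Int)) (x : Int) : List (Int × Int) :=
  match runs.getLast? with
  | some (v, c) => if v = x then runs.dropLast ++ [(v, c + 1)] else runs ++ [(x, 1)]
  | none => runs ++ [(x, 1)]

def findLHS_alt (nums : List Int) : Int :=
  let s := PySem.List.sorted nums (fun x => x) false
  let runs := s.foldl runStep []
  (runs.zip (PySem.List.slice runs (some 1))).foldl
    (fun res p => if p.2.1 = p.1.1 + 1 then max res (p.1.2 + p.2.2) else res)
    0

-- ===== PRECONDITION & SPEC =====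
def Spec_findLHS (nums : List Int) (out : Int) : Prop := out = findLHS_alt nums
instance (nums : List Int) (out : Int) : Decidable (Spec_findLHS nums out) := by unfold Spec_findLHS; infer_instance

-- ===== CLAIM (what is proved, stated in full; the proofs are below) =====
def Claim_equal_findLHS : Prop := ∀ (nums : List Int), Dom_findLHS nums → Spec_findLHS nums (findLHS nums)

-- ===== LEMMAS AND PROOFS =====

-- A's counting loop builds exactly Counter(nums).
lemma buildMap_eq_counter (nums : List Int) :
    nums.foldl
      (fun d i => if d.contains i then d.insert i (d.getD i 0 + 1) else d.insert i 1)
      PySem.Dict.empty = PySem.Dict.counter nums := by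
  have hstep : (fun (d : PySem.Dict Int Int) i =>
      if d.contains i then d.insert i (d.getD i 0 + 1) else d.insert i 1)
      = fun d i => d.insert i (d.getD i 0 + 1) := by
    funext d i
    by_cases h : d.contains i = true
    · simp [h]
    · rw [if_neg h, PySem.Dict.getD_of_not_contains d 0 (by simpa using h)]
      norm_num
  rw [hstep]
  exact PySem.Dict.foldl_insert_getD_add_one_eq_counter nums

-- a guarded running max is a plain foldl max over the filtered, mapped list
lemma guarded_foldl {α : Type} (Z : List α) (q : α → Bool) (h : α → Int) :
    Z.foldl (fun r p => if q p then max r (h p) else r) 0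
      = ((Z.filter q).map h).foldl max 0 := by
  rw [List.foldl_map, List.foldl_filter]

-- the same, for B's scan over adjacent run pairs (propositional guard)
lemma guarded_foldl_zip (Z : List ((Int × Int) × Int × Int)) :
    Z.foldl (fun res p => if p.2.1 = p.1.1 + 1 then max res (p.1.2 + p.2.2) else res) 0
      = ((Z.filter (fun p => decide (p.2.1 = p.1.1 + 1))).map (fun p => p.1.2 + p.2.2)).foldl max 0 := by
  rw [List.foldl_map, List.foldl_filter]
  simp only [decide_eq_true_eq]

-- in a strictly increasing list every element is at most the last one
lemma le_getLast_of_pairwise_lt : ∀ (D : List Int), D.Pairwise (· < ·) →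
    ∀ y ∈ D, ∀ (h : D ≠ []), y ≤ D.getLast h := by
  intro D
  induction D with
  | nil => intro _ y hy; cases hy
  | cons a t ih =>
      intro hp y hy h
      rcases List.pairwise_cons.mp hp with ⟨ha, hpt⟩
      cases t with
      | nil => simp at hy; simp [hy]
      | cons b t' =>
          rw [List.getLast_cons (by simp)]
          rcases List.mem_cons.mp hy with rfl | hyt
          · exact le_of_lt (lt_of_lt_of_le (ha b (by simp))
              (ih hpt b (by simp) (by simp)))
          · exact ih hpt y hyt (by simp)

-- dedup of a list extended by one element
lemma dedup_concat (s : List Int) (x : Int) :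
    PySem.List.dedup (s ++ [x])
      = if x ∈ s then PySem.List.dedup s else PySem.List.dedup s ++ [x] := by
  rw [PySem.List.dedup_eq_ofList, PySem.List.dedup_eq_ofList, PySem.Set.ofList_append_singleton,
    PySem.Set.add]
  by_cases hx : x ∈ s
  · simp [PySem.Set.contains, hx, PySem.Set.mem_ofList]
  · simp [PySem.Set.contains, hx, PySem.Set.mem_ofList]

-- dedup of a sorted list is strictly increasing
lemma dedup_pairwise_lt (s : List Int) (hs : s.Pairwise (· ≤ ·)) :
    (PySem.List.dedup s).Pairwise (· < ·) := by
  induction s using List.reverseRecOn with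
  | nil => simp [PySem.List.dedup]
  | append_singleton s x ih =>
      rcases List.pairwise_append.mp hs with ⟨hs', -, hub⟩
      rw [dedup_concat]
      by_cases hx : x ∈ s
      · simpa [hx] using ih hs'
      · rw [if_neg hx]
        refine List.pairwise_append.mpr ⟨ih hs', by simp, ?_⟩
        intro y hy b hb
        rw [List.mem_singleton.mp hb]
        have hys : y ∈ s := (PySem.List.mem_dedup s y).mp hy
        exact lt_of_le_of_ne (hub y hys x (by simp)) (fun h => hx (h ▸ hys))

-- reductions of one runStep step, by the shape of the current last run
lemma runStep_last_eq (runs : List (Int × Int)) (x : Int) (c : Int)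
    (h : runs.getLast? = some (x, c)) :
    runStep runs x = runs.dropLast ++ [(x, c + 1)] := by
  rw [runStep, h]; simp

lemma runStep_last_ne (runs : List (Int × Int)) (x v : Int) (c : Int)
    (h : runs.getLast? = some (v, c)) (hvx : v ≠ x) :
    runStep runs x = runs ++ [(x, 1)] := by
  rw [runStep, h]; simp [hvx]

lemma runStep_last_none (runs : List (Int × Int)) (x : Int)
    (h : runs.getLast? = none) :
    runStep runs x = runs ++ [(x, 1)] := by
  rw [runStep, h]

-- Source B's run-length loop over a sorted list produces (value, count) per distinct value
lemma runs_eq (s : List Int) (hs : s.Pairwise (· ≤ ·)) :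
    s.foldl runStep []
      = (PySem.List.dedup s).map (fun v => (v, (s.count v : Int))) := by
  induction s using List.reverseRecOn with
  | nil => simp [PySem.List.dedup]
  | append_singleton s x ih =>
      rcases List.pairwise_append.mp hs with ⟨hs', -, hub⟩
      rw [List.foldl_append, List.foldl_cons, List.foldl_nil, ih hs', dedup_concat]
      set D := PySem.List.dedup s with hD
      by_cases hx : x ∈ s
      · -- x extends the last run: the last distinct value of sorted s is x
        have hxD : x ∈ D := (PySem.List.mem_dedup s x).mpr hx
        have hne : D ≠ [] := List.ne_nil_of_mem hxD
        have hplt : D.Pairwise (· < ·) := dedup_pairwise_lt s hs'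
        have hlast : D.getLast hne = x := by
          refine le_antisymm ?_ (le_getLast_of_pairwise_lt D hplt x hxD hne)
          exact hub _ ((PySem.List.mem_dedup s _).mp (List.getLast_mem hne)) x (by simp)
        have hsplit : D.dropLast ++ [x] = D := by
          conv_rhs => rw [← List.dropLast_concat_getLast hne, hlast]
        have hnotlast : ∀ y ∈ D.dropLast, y ≠ x := by
          intro y hy
          have hnd : (D.dropLast ++ [x]).Nodup := by rw [hsplit]; exact PySem.List.nodup_dedup s
          exact fun h => (List.disjoint_of_nodup_append hnd) hy (by simp [h])
        have hLmap : (D.map (fun v => (v, (s.count v : Int)))).getLast?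
            = some (x, (s.count x : Int)) := by
          rw [List.getLast?_map, List.getLast?_eq_some_getLast hne, hlast]
          rfl
        rw [runStep_last_eq _ _ _ hLmap, if_pos hx]
        conv_rhs => rw [← hsplit]
        conv_lhs => rw [← hsplit]
        simp only [List.map_append, List.dropLast_concat, List.map_cons, List.map_nil]
        congr 1
        · refine List.map_congr_left (fun y hy => ?_)
          have hyx : y ≠ x := hnotlast y hy
          simp [List.count_append, Ne.symm hyx]
        · simp [List.count_append]
      · -- x starts a new run
        have hstep : runStep (D.map (fun v => (v, (s.count v : Int)))) x
            = D.map (fun v => (v, (s.count v : Int))) ++ [(x, 1)] := by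
          cases hD? : D with
          | nil => exact runStep_last_none _ _ (by simp)
          | cons a t =>
              have hne : D ≠ [] := by simp [hD?]
              have hlx : D.getLast hne ≠ x := by
                intro h
                exact hx (h ▸ (PySem.List.mem_dedup s _).mp (List.getLast_mem hne))
              refine runStep_last_ne _ x (D.getLast hne)
                ((s.count (D.getLast hne) : Int)) ?_ hlx
              rw [List.getLast?_map, ← hD?, List.getLast?_eq_some_getLast hne]
              rfl
        rw [hstep, if_neg hx, List.map_append]
        congr 1
        · refine List.map_congr_left (fun y hy => ?_)
          have hyx : y ≠ x := fun h => hx (h ▸ (PySem.List.mem_dedup s y).mp hy)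
          simp [List.count_append, Ne.symm hyx]
        · simp [List.count_append, List.count_eq_zero.mpr hx]

-- in a strictly increasing list, the values k with k+1 also present are exactly the first
-- components of adjacent pairs that differ by one
lemma adjacent_pairs (D : List Int) (hp : D.Pairwise (· < ·)) :
    ((D.zip (D.drop 1)).filter (fun p => decide (p.2 = p.1 + 1))).map Prod.fst
      = D.filter (fun k => decide ((k + 1) ∈ D)) := by
  induction D with
  | nil => simp
  | cons a t ih =>
      rcases List.pairwise_cons.mp hp with ⟨ha, hpt⟩
      cases t with
      | nil =>
          simp only [List.drop, List.zip_nil_right, List.filter_nil, List.map_nil,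
            List.mem_singleton, List.filter_cons, List.filter_nil]
          have : ¬ (a + 1 = a) := by omega
          simp [this]
      | cons b t' =>
          have hab : a < b := ha b (by simp)
          have hat' : ∀ y ∈ t', b < y := fun y hy => (List.pairwise_cons.mp hpt).1 y hy
          have hmem : ((a + 1) ∈ a :: b :: t') ↔ (b = a + 1) := by
            simp only [List.mem_cons]
            constructor
            · rintro (h | h | h)
              · omega
              · omega
              · exact absurd (hat' _ h) (by omega)
            · intro h; right; left; omega
          have htail : (b :: t').filter (fun k => decide ((k + 1) ∈ a :: b :: t'))
              = (b :: t').filter (fun k => decide ((k + 1) ∈ b :: t')) := by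
            refine List.filter_congr (fun k hk => ?_)
            have hk' : a < k := by
              rcases List.mem_cons.mp hk with rfl | h
              · exact hab
              · exact lt_trans hab (hat' _ h)
            simp only [decide_eq_decide, List.mem_cons]
            constructor
            · rintro (h | h) 
              · omega
              · exact h
            · intro h; right; exact h
          have hzip : (a :: b :: t').zip ((a :: b :: t').drop 1)
              = (a, b) :: ((b :: t').zip ((b :: t').drop 1)) := by simp
          rw [hzip]
          by_cases hd : b = a + 1
          · rw [List.filter_cons_of_pos (by simp [hd]), List.map_cons, ih hpt]
            conv_rhs => rw [List.filter_cons_of_pos (by simp [hmem.mpr hd])]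
            rw [htail]
          · rw [List.filter_cons_of_neg (by simp [hd]), ih hpt]
            have h2 : ¬ ((a + 1) ∈ a :: b :: t') := fun h => hd (hmem.mp h)
            conv_rhs => rw [List.filter_cons_of_neg (by simpa using h2)]
            exact htail.symm

theorem findLHS_eq_alt (nums : List Int) : findLHS nums = findLHS_alt nums := by
  by_cases hne : nums = []
  · subst hne; rfl
  · have hs_pair : (PySem.List.sorted nums (fun x => x) false).Pairwise (· ≤ ·) := by
      simpa using PySem.List.sorted_pairwise nums (fun x => x)
    have hs_perm : (PySem.List.sorted nums (fun x => x) false).Perm nums :=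
      PySem.List.sorted_perm nums (fun x => x) false
    have hcnt : ∀ v, (PySem.List.sorted nums (fun x => x) false).count v = nums.count v :=
      fun v => hs_perm.count_eq v
    have hplt : (PySem.List.dedup (PySem.List.sorted nums (fun x => x) false)).Pairwise (· < ·) :=
      dedup_pairwise_lt _ hs_pair
    have hmemD : ∀ v, v ∈ PySem.List.dedup (PySem.List.sorted nums (fun x => x) false)
        ↔ v ∈ nums := fun v =>
      (PySem.List.mem_dedup _ v).trans hs_perm.mem_iff
    -- A's value: guarded max over the distinct values in first-occurrence order
    have hA : findLHS nums
        = (((PySem.Set.ofList nums).filter (fun k => nums.contains (k + 1))).map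
            (fun k => ((nums.count k : Int) + (nums.count (k + 1) : Int)))).foldl max 0 := by
      unfold findLHS
      simp only [hne, if_false, buildMap_eq_counter, PySem.Dict.keys_counter,
        PySem.Dict.contains_counter, PySem.Dict.getD_counter]
      exact guarded_foldl (PySem.Set.ofList nums) _ _
    -- B's value: the same guarded max over the distinct values in increasing order
    have hB : findLHS_alt nums
        = (((PySem.List.dedup (PySem.List.sorted nums (fun x => x) false)).filter
              (fun k => nums.contains (k + 1))).map
            (fun k => ((nums.count k : Int) + (nums.count (k + 1) : Int)))).foldl max 0 := by
      show ((((PySem.List.sorted nums (fun x => x) false).foldl runStep []).zip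
          (PySem.List.slice ((PySem.List.sorted nums (fun x => x) false).foldl runStep [])
            (some 1))).foldl
          (fun res p => if p.2.1 = p.1.1 + 1 then max res (p.1.2 + p.2.2) else res) 0) = _
      rw [runs_eq _ hs_pair, PySem.List.slice_from _ (by norm_num : (0:Int) ≤ 1), guarded_foldl_zip]
      congr 1
      rw [Int.toNat_one, ← List.map_drop, List.zip_map, List.filter_map, List.map_map]
      have hq : ((fun (p : (Int × Int) × Int × Int) => decide (p.2.1 = p.1.1 + 1)) ∘
          Prod.map (fun v => (v, ((PySem.List.sorted nums (fun x => x) false).count v : Int)))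
            (fun v => (v, ((PySem.List.sorted nums (fun x => x) false).count v : Int))))
          = fun (p : Int × Int) => decide (p.2 = p.1 + 1) := by
        funext p; rcases p with ⟨a, b⟩; rfl
      rw [hq]
      have hmap : ∀ p ∈ ((PySem.List.dedup (PySem.List.sorted nums (fun x => x) false)).zip
            ((PySem.List.dedup (PySem.List.sorted nums (fun x => x) false)).drop 1)).filter
            (fun p => decide (p.2 = p.1 + 1)),
          (((fun (p : (Int × Int) × Int × Int) => p.1.2 + p.2.2) ∘
            Prod.map (fun v => (v, ((PySem.List.sorted nums (fun x => x) false).count v : Int)))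
              (fun v => (v, ((PySem.List.sorted nums (fun x => x) false).count v : Int)))) p)
          = ((fun k => ((nums.count k : Int) + (nums.count (k + 1) : Int))) ∘ Prod.fst) p := by
        rintro ⟨a, b⟩ hp
        have hb : b = a + 1 := by
          have := (List.mem_filter.mp hp).2
          simpa using this
        simp [hb, hcnt]
      rw [List.map_congr_left hmap, ← List.map_map, adjacent_pairs _ hplt]
      congr 1
      refine List.filter_congr (fun k hk => ?_)
      simp
    -- the two candidate lists are permutations of each other
    have hperm : ((PySem.Set.ofList nums).filter (fun k => nums.contains (k + 1))).Perm
        ((PySem.List.dedup (PySem.List.sorted nums (fun x => x) false)).filter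
          (fun k => nums.contains (k + 1))) := by
      refine List.Perm.filter _ ?_
      refine (List.perm_ext_iff_of_nodup (PySem.Set.nodup_ofList nums)
        (PySem.List.nodup_dedup _)).mpr (fun a => ?_)
      rw [PySem.Set.mem_ofList, hmemD]
    rw [hA, hB]
    exact (hperm.map _).foldl_eq 0

-- ===== VERDICT (by name: the statement is the Claim_ definition above) =====
theorem findLHS_spec : Claim_equal_findLHS := by
  intro nums _
  unfold Spec_findLHS
  exact findLHS_eq_alt nums
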